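-- pv_equiv track=rewrite | github.com/bryantran24/slitherlink | 1x1.py | build_vertices
-- ===== SOURCE A (Python) =====
-- def h_name(rr, cc): return f"h{rr}{cc}"
--
-- def v_name(rr, cc): return f"v{rr}{cc}"
--
-- def build_vertices(H, W):
--     vertices = []
--     incident_vtx = {}
--
--     for r in range(H + 1):
--         for c in range(W + 1):
--             p = f"p{r}{c}"
--             vertices.append(p)
--
--             inc = []
--             # horizontal edges touching this vertex
--             if c > 0:
--                 inc.append(h_name(r, c - 1))
--             if c < W:
--                 inc.append(h_name(r, c))
--
--             # vertical edges touching this vertex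
--             if r > 0:
--                 inc.append(v_name(r - 1, c))
--             if r < H:
--                 inc.append(v_name(r, c))
--
--             incident_vtx[p] = inc
--
--     return vertices, incident_vtx
-- ===== SOURCE B (Python) =====
-- def h_name(rr, cc): return f"h{rr}{cc}"
--
-- def v_name(rr, cc): return f"v{rr}{cc}"
--
-- def build_vertices(H, W):
--     # edge-centric: list the vertices, start every incident list empty,
--     # then walk the horizontal edges and the vertical edges once each,
--     # pushing each edge onto the lists of its two endpoints.
--     vertices = [f"p{r}{c}" for r in range(H + 1) for c in range(W + 1)]
--     inc = {(r, c): [] for r in range(H + 1) for c in range(W + 1)}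
--     for r in range(H + 1):
--         for c in range(W):
--             e = h_name(r, c)
--             inc[(r, c)].append(e)
--             inc[(r, c + 1)].append(e)
--     for r in range(H):
--         for c in range(W + 1):
--             e = v_name(r, c)
--             inc[(r, c)].append(e)
--             inc[(r + 1, c)].append(e)
--     incident_vtx = {f"p{r}{c}": inc[(r, c)] for r in range(H + 1) for c in range(W + 1)}
--     return vertices, incident_vtx
-- ===== Notes on version B (the rewrite author's own statement) =====
-- stated objective: alternative
-- what changed: B is edge-centric: it creates all vertices with empty incident lists, then makes one pass over the horizontal edges and one over the vertical edges, appending each edge to its two endpoints' lists (keyed by coordinate pair), instead of A's vertex-centric per-vertex case analysis.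
import Mathlib
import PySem

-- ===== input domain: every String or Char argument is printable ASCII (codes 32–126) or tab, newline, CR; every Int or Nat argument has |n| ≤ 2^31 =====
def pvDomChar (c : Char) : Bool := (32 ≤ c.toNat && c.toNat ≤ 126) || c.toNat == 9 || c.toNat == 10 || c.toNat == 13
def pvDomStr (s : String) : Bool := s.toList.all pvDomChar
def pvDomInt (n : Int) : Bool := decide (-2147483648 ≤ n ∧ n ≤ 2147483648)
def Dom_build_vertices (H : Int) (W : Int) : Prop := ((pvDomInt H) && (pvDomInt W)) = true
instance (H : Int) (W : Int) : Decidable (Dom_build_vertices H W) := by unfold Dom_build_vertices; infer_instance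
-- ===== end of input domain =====

-- B builds the same vertex list and incidence map edge-centrically (one pass over the
-- horizontal edges, one over the vertical edges, appending each edge to its two endpoints,
-- keyed by coordinate pair) instead of A's per-vertex case analysis; the return values are
-- proved equal for all H, W.

-- ===== PORT A =====
def h_name (rr : Int) (cc : Int) : String := "h" ++ PySem.Int.toStr rr ++ PySem.Int.toStr cc

def v_name (rr : Int) (cc : Int) : String := "v" ++ PySem.Int.toStr rr ++ PySem.Int.toStr cc

def p_name (r : Int) (c : Int) : String := "p" ++ PySem.Int.toStr r ++ PySem.Int.toStr c

def build_vertices (H : Int) (W : Int) : List String × (List (String × List String)) :=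
  let st :=
    (PySem.List.pyRange 0 (H + 1)).foldl (fun st r =>
      (PySem.List.pyRange 0 (W + 1)).foldl (fun st c =>
        let p := p_name r c
        let inc : List String := []
        let inc := if 0 < c then inc ++ [h_name r (c - 1)] else inc
        let inc := if c < W then inc ++ [h_name r c] else inc
        let inc := if 0 < r then inc ++ [v_name (r - 1) c] else inc
        let inc := if r < H then inc ++ [v_name r c] else inc
        (st.1 ++ [p], st.2.insert p inc)) st)
      (([] : List String), (PySem.Dict.empty : PySem.Dict String (List String)))
  (st.1, st.2.items)

-- ===== PORT B =====
def build_vertices_alt (H : Int) (W : Int) : List String × (List (String × List String)) :=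
  let rows := PySem.List.pyRange 0 (H + 1)
  let cols := PySem.List.pyRange 0 (W + 1)
  let vertices := rows.flatMap (fun r => cols.map (fun c => p_name r c))
  let inc : PySem.Dict (Int × Int) (List String) :=
    rows.foldl (fun d r => cols.foldl (fun d c => d.insert (r, c) []) d) PySem.Dict.empty
  let inc :=
    rows.foldl (fun d r =>
      (PySem.List.pyRange 0 W).foldl (fun d c =>
        let e := h_name r c
        let d := d.modify (r, c) [] (fun x => x ++ [e])
        d.modify (r, c + 1) [] (fun x => x ++ [e])) d) inc
  let inc :=
    (PySem.List.pyRange 0 H).foldl (fun d r =>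
      cols.foldl (fun d c =>
        let e := v_name r c
        let d := d.modify (r, c) [] (fun x => x ++ [e])
        d.modify (r + 1, c) [] (fun x => x ++ [e])) d) inc
  let incident_vtx : PySem.Dict String (List String) :=
    rows.foldl (fun d r => cols.foldl (fun d c => d.insert (p_name r c) (inc.getD (r, c) [])) d)
      PySem.Dict.empty
  (vertices, incident_vtx.items)

-- ===== PRECONDITION & SPEC =====
def Spec_build_vertices (H : Int) (W : Int) (out : List String × (List (String × List String))) : Prop := out = build_vertices_alt H W
instance (H : Int) (W : Int) (out : List String × (List (String × List String))) : Decidable (Spec_build_vertices H W out) := by unfold Spec_build_vertices; infer_instance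

-- ===== CLAIM (what is proved, stated in full; the proofs are below) =====
def Claim_equal_build_vertices : Prop := ∀ (H : Int) (W : Int), Dom_build_vertices H W → Spec_build_vertices H W (build_vertices H W)

-- ===== LEMMAS AND PROOFS =====

theorem pyRange_toNat (n : Int) :
    PySem.List.pyRange 0 n = (List.range n.toNat).map (fun (i : Nat) => (i : Int)) := by
  rcases n with n | n
  · exact PySem.List.pyRange_zero_natCast n
  · simp [PySem.List.pyRange]

-- flatMap over List.range of a function vanishing except at (integer) positions i < j
theorem flatMap_range_two {β : Type} (g : Nat → List β) (i j : Int) (hij : i < j) (n : Nat)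
    (h : ∀ k < n, (k : Int) ≠ i → (k : Int) ≠ j → g k = []) :
    (List.range n).flatMap g
      = (if 0 ≤ i ∧ i < (n : Int) then g i.toNat else [])
        ++ (if 0 ≤ j ∧ j < (n : Int) then g j.toNat else []) := by
  induction n with
  | zero => simp
  | succ n ih =>
    rw [List.range_succ, List.flatMap_append,
        ih (fun k hk h1 h2 => h k (by omega) h1 h2)]
    simp only [List.flatMap_cons, List.flatMap_nil, List.append_nil]
    by_cases hi : (n : Int) = i
    · have hiT : i.toNat = n := by omega
      rw [if_neg (by omega : ¬ (0 ≤ i ∧ i < (n : Int))),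
          if_neg (by omega : ¬ (0 ≤ j ∧ j < (n : Int))),
          if_pos (show 0 ≤ i ∧ i < ((n + 1 : Nat) : Int) by push_cast; omega),
          if_neg (show ¬ (0 ≤ j ∧ j < ((n + 1 : Nat) : Int)) by push_cast; omega), hiT]
      simp
    · by_cases hj : (n : Int) = j
      · have hjT : j.toNat = n := by omega
        rw [if_neg (by omega : ¬ (0 ≤ j ∧ j < (n : Int))),
            if_pos (show 0 ≤ j ∧ j < ((n + 1 : Nat) : Int) by push_cast; omega), hjT,
            List.append_nil]
        congr 1
        exact if_congr (by push_cast; omega) rfl rfl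
      · rw [h n (by omega) hi hj]
        simp only [List.append_nil]
        congr 1
        · exact if_congr (by push_cast; omega) rfl rfl
        · exact if_congr (by push_cast; omega) rfl rfl

theorem filter_pair (k1 k2 key : Int × Int) (e1 e2 : String) :
    ([(k1, e1), (k2, e2)].filter (fun p => p.1 == key))
      = (if k1 = key then [(k1, e1)] else []) ++ (if k2 = key then [(k2, e2)] else []) := by
  have b1 : (k1 == key) = decide (k1 = key) := by
    rcases eq_or_ne k1 key with h | h <;> simp [h]
  have b2 : (k2 == key) = decide (k2 = key) := by
    rcases eq_or_ne k2 key with h | h <;> simp [h]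
  rcases eq_or_ne k1 key with h1 | h1 <;> rcases eq_or_ne k2 key with h2 | h2 <;>
    simp [List.filter, b1, b2, h1, h2]

-- the closed-form incident list A computes for vertex (r, c)
def incA (H : Int) (W : Int) (r : Int) (c : Int) : List String :=
  ((if 0 < c then [h_name r (c - 1)] else []) ++ (if c < W then [h_name r c] else []))
    ++ ((if 0 < r then [v_name (r - 1) c] else []) ++ (if r < H then [v_name r c] else []))

theorem chain_eq (H W r c : Int) :
    (let inc : List String := []
     let inc := if 0 < c then inc ++ [h_name r (c - 1)] else inc
     let inc := if c < W then inc ++ [h_name r c] else inc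
     let inc := if 0 < r then inc ++ [v_name (r - 1) c] else inc
     if r < H then inc ++ [v_name r c] else inc) = incA H W r c := by
  by_cases h1 : 0 < c <;> by_cases h2 : c < W <;> by_cases h3 : 0 < r <;> by_cases h4 : r < H <;>
    simp [incA, h1, h2, h3, h4]

-- the flattened append-instruction streams of B's two edge passes
def hInstrs (H : Int) (W : Int) : List ((Int × Int) × String) :=
  (PySem.List.pyRange 0 (H + 1)).flatMap (fun r =>
    (PySem.List.pyRange 0 W).flatMap (fun c =>
      [((r, c), h_name r c), ((r, c + 1), h_name r c)]))

def vInstrs (H : Int) (W : Int) : List ((Int × Int) × String) :=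
  (PySem.List.pyRange 0 H).flatMap (fun r =>
    (PySem.List.pyRange 0 (W + 1)).flatMap (fun c =>
      [((r, c), v_name r c), ((r + 1, c), v_name r c)]))

theorem phaseH_eq (H W : Int) (d : PySem.Dict (Int × Int) (List String)) :
    (PySem.List.pyRange 0 (H + 1)).foldl (fun d r =>
      (PySem.List.pyRange 0 W).foldl (fun d c =>
        (d.modify (r, c) [] (fun x => x ++ [h_name r c])).modify (r, c + 1) []
          (fun x => x ++ [h_name r c])) d) d
    = (hInstrs H W).foldl (fun d p => d.modify p.1 [] (fun x => x ++ [p.2])) d := by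
  unfold hInstrs
  simp only [List.foldl_flatMap, List.foldl_cons, List.foldl_nil]

theorem phaseV_eq (H W : Int) (d : PySem.Dict (Int × Int) (List String)) :
    (PySem.List.pyRange 0 H).foldl (fun d r =>
      (PySem.List.pyRange 0 (W + 1)).foldl (fun d c =>
        (d.modify (r, c) [] (fun x => x ++ [v_name r c])).modify (r + 1, c) []
          (fun x => x ++ [v_name r c])) d) d
    = (vInstrs H W).foldl (fun d p => d.modify p.1 [] (fun x => x ++ [p.2])) d := by
  unfold vInstrs
  simp only [List.foldl_flatMap, List.foldl_cons, List.foldl_nil]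

theorem hinner_eq (W r0 c0 : Int) (hc : 0 ≤ c0 ∧ c0 ≤ W) :
    (((PySem.List.pyRange 0 W).flatMap (fun c =>
        [((r0, c), h_name r0 c), ((r0, c + 1), h_name r0 c)])).filter
      (fun p => p.1 == (r0, c0))).map (fun p => p.2)
    = (if 0 < c0 then [h_name r0 (c0 - 1)] else []) ++ (if c0 < W then [h_name r0 c0] else []) := by
  rw [pyRange_toNat W, List.flatMap_map, List.filter_flatMap, List.map_flatMap]
  rw [flatMap_range_two _ (c0 - 1) c0 (by omega) W.toNat
    (by
      intro k hk h1 h2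
      have h1' : ¬ ((k : Int) + 1 = c0) := by omega
      simp [Prod.mk.injEq, h1', h2])]
  congr 1
  · by_cases hp : 0 < c0
    · rw [if_pos (by omega), if_pos hp, Int.toNat_of_nonneg (by omega : (0:Int) ≤ c0 - 1)]
      have : c0 - 1 + 1 = c0 := by omega
      have hne : ¬ (c0 - 1 = c0) := by omega
      simp [Prod.mk.injEq, this, hne]
    · rw [if_neg (by omega), if_neg hp]
  · by_cases hp : c0 < W
    · rw [if_pos (by omega), if_pos hp, Int.toNat_of_nonneg hc.1]
      have hne : ¬ (c0 + 1 = c0) := by omega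
      simp [Prod.mk.injEq, hne]
    · rw [if_neg (by omega), if_neg hp]

theorem hfilter_eq (H W r0 c0 : Int) (hr : 0 ≤ r0 ∧ r0 ≤ H) (hc : 0 ≤ c0 ∧ c0 ≤ W) :
    ((hInstrs H W).filter (fun p => p.1 == (r0, c0))).map (fun p => p.2)
      = (if 0 < c0 then [h_name r0 (c0 - 1)] else []) ++ (if c0 < W then [h_name r0 c0] else []) := by
  unfold hInstrs
  rw [pyRange_toNat (H + 1), List.flatMap_map, List.filter_flatMap, List.map_flatMap]
  rw [flatMap_range_two _ r0 (((H + 1).toNat : Nat) : Int) (by omega) (H + 1).toNat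
    (by
      intro k hk h1 _
      simp [List.filter_flatMap, Prod.mk.injEq, h1])]
  rw [if_pos (by omega), if_neg (by omega), List.append_nil, Int.toNat_of_nonneg hr.1]
  exact hinner_eq W r0 c0 hc

theorem vinner_eq (W r r0 c0 : Int) (hc : 0 ≤ c0 ∧ c0 ≤ W) :
    (((PySem.List.pyRange 0 (W + 1)).flatMap (fun c =>
        [((r, c), v_name r c), ((r + 1, c), v_name r c)])).filter
      (fun p => p.1 == (r0, c0))).map (fun p => p.2)
    = (if r = r0 then [v_name r c0] else []) ++ (if r + 1 = r0 then [v_name r c0] else []) := by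
  rw [pyRange_toNat (W + 1), List.flatMap_map, List.filter_flatMap, List.map_flatMap]
  rw [flatMap_range_two _ c0 (((W + 1).toNat : Nat) : Int) (by omega) (W + 1).toNat
    (by
      intro k hk h1 _
      simp [Prod.mk.injEq, h1])]
  rw [if_pos (by omega), if_neg (by omega), List.append_nil, Int.toNat_of_nonneg hc.1]
  simp [filter_pair, Prod.mk.injEq, apply_ite (List.map (fun (p : (Int × Int) × String) => p.2))]

theorem vfilter_eq (H W r0 c0 : Int) (hr : 0 ≤ r0 ∧ r0 ≤ H) (hc : 0 ≤ c0 ∧ c0 ≤ W) :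
    ((vInstrs H W).filter (fun p => p.1 == (r0, c0))).map (fun p => p.2)
      = (if 0 < r0 then [v_name (r0 - 1) c0] else []) ++ (if r0 < H then [v_name r0 c0] else []) := by
  unfold vInstrs
  rw [pyRange_toNat H, List.flatMap_map, List.filter_flatMap, List.map_flatMap]
  rw [flatMap_range_two _ (r0 - 1) r0 (by omega) H.toNat
    (by
      intro k hk h1 h2
      have h1' : ¬ ((k : Int) + 1 = r0) := by omega
      simp [List.filter_flatMap, Prod.mk.injEq, h1', h2])]
  congr 1
  · by_cases hp : 0 < r0
    · rw [if_pos (by omega), if_pos hp, Int.toNat_of_nonneg (by omega : (0:Int) ≤ r0 - 1)]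
      rw [vinner_eq W (r0 - 1) r0 c0 hc]
      have h1 : ¬ (r0 - 1 = r0) := by omega
      have h2 : r0 - 1 + 1 = r0 := by omega
      simp [h1, h2]
    · rw [if_neg (by omega), if_neg hp]
  · by_cases hp : r0 < H
    · rw [if_pos (by omega), if_pos hp, Int.toNat_of_nonneg hr.1]
      rw [vinner_eq W r0 r0 c0 hc]
      have h2 : ¬ (r0 + 1 = r0) := by omega
      simp [h2]
    · rw [if_neg (by omega), if_neg hp]

theorem insert_nil_fold {γ : Type} (l : List γ) (kf : γ → Int × Int)
    (d : PySem.Dict (Int × Int) (List String)) (key : Int × Int) (h : d.getD key [] = []) :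
    (l.foldl (fun d x => d.insert (kf x) []) d).getD key [] = [] := by
  induction l generalizing d with
  | nil => exact h
  | cons a l ih =>
    refine ih _ ?_
    rw [PySem.Dict.getD_insert]
    split <;> simp [h]

theorem init_getD (H W : Int) (key : Int × Int) :
    ((PySem.List.pyRange 0 (H + 1)).foldl (fun d r =>
        (PySem.List.pyRange 0 (W + 1)).foldl (fun d c => d.insert (r, c) []) d)
      (PySem.Dict.empty : PySem.Dict (Int × Int) (List String))).getD key [] = [] := by
  have main : ∀ (rows : List Int) (d : PySem.Dict (Int × Int) (List String)),
      d.getD key [] = [] →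
      ((rows.foldl (fun d r =>
          (PySem.List.pyRange 0 (W + 1)).foldl (fun d c => d.insert (r, c) []) d) d)).getD key []
        = [] := by
    intro rows
    induction rows with
    | nil => exact fun d h => h
    | cons r rows ih =>
      intro d h
      exact ih _ (insert_nil_fold (PySem.List.pyRange 0 (W + 1)) (fun c => (r, c)) d key h)
  exact main _ _ (PySem.Dict.getD_empty key [])

theorem incDict_getD (H W r0 c0 : Int) (hr : 0 ≤ r0 ∧ r0 ≤ H) (hc : 0 ≤ c0 ∧ c0 ≤ W) :
    ((vInstrs H W).foldl (fun d p => d.modify p.1 [] (fun x => x ++ [p.2]))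
      ((hInstrs H W).foldl (fun d p => d.modify p.1 [] (fun x => x ++ [p.2]))
        ((PySem.List.pyRange 0 (H + 1)).foldl (fun d r =>
            (PySem.List.pyRange 0 (W + 1)).foldl (fun d c => d.insert (r, c) []) d)
          (PySem.Dict.empty : PySem.Dict (Int × Int) (List String))))).getD (r0, c0) []
    = incA H W r0 c0 := by
  rw [PySem.Dict.getD_foldl_modify_append, PySem.Dict.getD_foldl_modify_append,
      init_getD, hfilter_eq H W r0 c0 hr hc, vfilter_eq H W r0 c0 hr hc]
  simp [incA]

theorem splitA (rows cols : List Int) (body : Int → Int → List String)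
    (v : List String) (d : PySem.Dict String (List String)) :
    rows.foldl (fun st r => cols.foldl (fun st c =>
        (st.1 ++ [p_name r c], st.2.insert (p_name r c) (body r c))) st) (v, d)
    = (rows.foldl (fun v r => cols.foldl (fun v c => v ++ [p_name r c]) v) v,
       rows.foldl (fun d r => cols.foldl (fun d c => d.insert (p_name r c) (body r c)) d) d) := by
  induction rows generalizing v d with
  | nil => rfl
  | cons r rows ih =>
    simp only [List.foldl_cons]
    rw [show (cols.foldl (fun st c => (st.1 ++ [p_name r c], st.2.insert (p_name r c) (body r c))) (v, d))
        = (cols.foldl (fun v c => v ++ [p_name r c]) v,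
           cols.foldl (fun d c => d.insert (p_name r c) (body r c)) d) from
      PySem.List.foldl_prod_mk (fun v c => v ++ [p_name r c])
        (fun d c => d.insert (p_name r c) (body r c)) cols v d]
    exact ih _ _

-- ===== VERDICT (by name: the statement is the Claim_ definition above) =====
theorem build_vertices_spec : Claim_equal_build_vertices := by
  intro H W _
  unfold Spec_build_vertices
  simp only [build_vertices, build_vertices_alt]
  rw [splitA]
  simp only [Prod.mk.injEq]
  constructor
  · simp only [PySem.List.foldl_append_singleton_eq_map]
    rw [PySem.List.foldl_append_eq_flatMap]
    simp
  · refine congrArg PySem.Dict.items ?_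
    simp only [phaseH_eq, phaseV_eq]
    apply PySem.List.foldl_congr_mem
    intro acc r hr
    apply PySem.List.foldl_congr_mem
    intro acc' c hc
    rw [PySem.List.mem_pyRange_one] at hr hc
    congr 1
    rw [incDict_getD H W r c ⟨hr.1, by omega⟩ ⟨hc.1, by omega⟩]
    exact chain_eq H W r c
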